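-- pv_equiv track=rewrite | github.com/mrenters/DFtoolkit3 | dftoolkit/texttools.py | coalesce_fragments
-- ===== SOURCE A (Python) =====
-- def coalesce_fragments(fragments):
--     '''Coalesce (font, text) tuples if the fonts are the same'''
--     last_font = None
--     last_text = None
--     new_fragments = []
--     for font, text in fragments:
--         if last_font != font:
--             if last_font is not None:
--                 new_fragments.append((last_font, last_text))
--                 last_text = ''
--             last_font = font
--             last_text = text
--         else:
--             last_text += text
--     if fragments:
--         new_fragments.append((last_font, last_text))
--     return new_fragments
-- ===== SOURCE B (Python) =====
-- def coalesce_fragments(fragments):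
--     '''Coalesce (font, text) tuples if the fonts are the same'''
--     out = []
--     i = 0
--     n = len(fragments)
--     while i < n:
--         font = fragments[i][0]
--         j = i
--         parts = []
--         while j < n and fragments[j][0] == font:
--             parts.append(fragments[j][1])
--             j += 1
--         out.append((font, ''.join(parts)))
--         i = j
--     return out
-- ===== Notes on version B (the rewrite author's own statement) =====
-- stated objective: alternative
-- what changed: Replaces A's stateful single pass (last_font/last_text accumulators flushed on font change and after the loop) by a run-based two-level scan: for each maximal run of equal fonts, collect the texts and emit (font, ''.join(parts)) once.
import Mathlib
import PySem

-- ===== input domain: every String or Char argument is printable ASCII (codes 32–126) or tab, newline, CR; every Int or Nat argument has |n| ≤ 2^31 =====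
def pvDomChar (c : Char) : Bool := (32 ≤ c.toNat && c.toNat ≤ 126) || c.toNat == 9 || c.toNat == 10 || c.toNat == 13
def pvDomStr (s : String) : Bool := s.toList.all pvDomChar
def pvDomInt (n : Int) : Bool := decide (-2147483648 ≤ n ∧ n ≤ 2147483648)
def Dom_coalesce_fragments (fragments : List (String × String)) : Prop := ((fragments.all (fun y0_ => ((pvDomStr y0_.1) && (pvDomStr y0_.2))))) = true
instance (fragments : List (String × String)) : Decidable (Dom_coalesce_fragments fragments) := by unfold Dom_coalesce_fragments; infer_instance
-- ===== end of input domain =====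

-- B replaces A's stateful single pass (last_font/last_text flush) by a run-based
-- two-level scan (collect each maximal equal-font run, join its texts); same cost.


-- ===== PORT A =====
-- state: (current pending (last_font, last_text) if any, new_fragments so far)
def coalesceStepA (st : Option (String × String) × List (String × String))
    (ft : String × String) : Option (String × String) × List (String × String) :=
  match st.1 with
  | none => (some (ft.1, ft.2), st.2)
  | some (lf, lt) =>
    if lf ≠ ft.1 then (some (ft.1, ft.2), st.2 ++ [(lf, lt)])
    else (some (lf, lt ++ ft.2), st.2)

def coalesce_fragments (fragments : List (String × String)) : List (String × String) :=
  let st := fragments.foldl coalesceStepA (none, [])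
  if fragments.isEmpty then st.2 else st.2 ++ [st.1.getD ("", "")]

-- ===== PORT B =====
-- inner while loop: texts of the leading run with font `font`, and the rest
def spanFont (font : String) : List (String × String) → List String × List (String × String)
  | [] => ([], [])
  | (f, t) :: rest =>
    if f == font then
      let (ps, r) := spanFont font rest
      (t :: ps, r)
    else ([], (f, t) :: rest)

-- ''.join(parts)
def strJoin : List String → String
  | [] => ""
  | s :: rest => s ++ strJoin rest

theorem spanFont_len (font : String) (l : List (String × String)) :
    (spanFont font l).2.length ≤ l.length := by
  induction l with
  | nil => simp [spanFont]
  | cons x rest ih =>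
    obtain ⟨f, t⟩ := x
    simp only [spanFont]
    split
    · simpa using Nat.le_succ_of_le ih
    · simp

def coalesce_fragments_alt : List (String × String) → List (String × String)
  | [] => []
  | (f, t) :: rest =>
    (f, strJoin (t :: (spanFont f rest).1)) :: coalesce_fragments_alt (spanFont f rest).2
termination_by l => l.length
decreasing_by
  simp only [List.length_cons]
  exact Nat.lt_succ_of_le (spanFont_len f rest)

-- ===== PRECONDITION & SPEC =====
def Spec_coalesce_fragments (fragments : List (String × String)) (out : List (String × String)) : Prop := out = coalesce_fragments_alt fragments
instance (fragments : List (String × String)) (out : List (String × String)) : Decidable (Spec_coalesce_fragments fragments out) := by unfold Spec_coalesce_fragments; infer_instance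

-- ===== CLAIM (what is proved, stated in full; the proofs are below) =====
def Claim_equal_coalesce_fragments : Prop := ∀ (fragments : List (String × String)), Dom_coalesce_fragments fragments → Spec_coalesce_fragments fragments (coalesce_fragments fragments)

-- ===== LEMMAS AND PROOFS =====

theorem alt_same_head (lf lt : String) (l : List (String × String)) (t : String) :
    coalesce_fragments_alt ((lf, lt) :: (lf, t) :: l)
      = coalesce_fragments_alt ((lf, lt ++ t) :: l) := by
  rw [coalesce_fragments_alt, coalesce_fragments_alt]
  simp [spanFont, strJoin, String.append_assoc]

theorem alt_diff_head (lf lt f t : String) (l : List (String × String)) (h : lf ≠ f) :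
    coalesce_fragments_alt ((lf, lt) :: (f, t) :: l)
      = (lf, lt) :: coalesce_fragments_alt ((f, t) :: l) := by
  rw [coalesce_fragments_alt]
  simp [spanFont, (by simpa [eq_comm] using h : ¬ f = lf), strJoin]

theorem loop_lemma (l : List (String × String)) :
    ∀ (lf lt : String) (acc : List (String × String)),
      (l.foldl coalesceStepA (some (lf, lt), acc)).2
        ++ [(l.foldl coalesceStepA (some (lf, lt), acc)).1.getD ("", "")]
      = acc ++ coalesce_fragments_alt ((lf, lt) :: l) := by
  induction l with
  | nil =>
    intro lf lt acc
    rw [coalesce_fragments_alt]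
    simp [spanFont, strJoin, coalesce_fragments_alt]
  | cons x rest ih =>
    intro lf lt acc
    obtain ⟨f, t⟩ := x
    by_cases h : lf = f
    · subst h
      simp only [List.foldl_cons, coalesceStepA, if_neg (fun h => h rfl : ¬ lf ≠ lf)]
      rw [ih, alt_same_head]
    · simp only [List.foldl_cons, coalesceStepA, if_pos h]
      rw [ih, alt_diff_head lf lt f t rest h]
      simp

-- ===== VERDICT (by name: the statement is the Claim_ definition above) =====
theorem coalesce_fragments_spec : Claim_equal_coalesce_fragments := by
  intro fragments _
  unfold Spec_coalesce_fragments coalesce_fragments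
  cases fragments with
  | nil => simp [coalesce_fragments_alt]
  | cons x rest =>
    obtain ⟨f, t⟩ := x
    simp only [List.isEmpty_cons, List.foldl_cons, coalesceStepA]
    simpa using loop_lemma rest f t []
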